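-- pv_equiv track=rewrite | github.com/1688168/Codes | LC/[3018] Maximum Number of Removal Queries That Can Be Processed I.py | maximumProcessableQueries
-- ===== SOURCE A (Python) =====
-- from typing import List
--
-- def maximumProcessableQueries(nums: List[int], queries: List[int]) -> int:
--     N, M = len(nums), len(queries)
--
--     dp = [[0]*N for _ in range(N)]
--     #dp[ii][jj]: the max query we can perform for nums in interavl [ii, jj]
--
--     # initialize the DP
--     dp[0][N-1] = 0 # we can perform no query when we have full interval (eliminating nothing)
--
--     # DP is moving from known state to unknown state.  since we know intervanl [0, N-1]
--     for ll in range(N, 0, -1):  # from full interval to 1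
--         for ii in range(N-ll+1): # for each interval start. //ii+len-1 <= N-1 -> ii <= ii-len
--             jj=ii+ll-1
--
--             # current state from [ii-1, jj]
--             if ii-1 >= 0:
--                 kk = dp[ii-1][jj]
--                 if kk < M and nums[ii-1] >= queries[kk]:
--                     dp[ii][jj] = max(dp[ii][jj], 1+dp[ii-1][jj])
--                 else:
--                     dp[ii][jj] = max(dp[ii][jj], dp[ii-1][jj])
--
--             # current state from [ii, jj+1]
--             if jj+1 < N:
--                 kk = dp[ii][jj+1]
--                 if kk < M and nums[jj+1] >= queries[kk]:
--                     dp[ii][jj] = max(dp[ii][jj], 1+dp[ii][jj+1])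
--                 else:
--                     dp[ii][jj] = max(dp[ii][jj], dp[ii][jj+1])
--
--     ans=0
--
--     for ii in range(N):
--         kk = dp[ii][ii]
--         if kk < M and nums[ii] >= queries[kk]:
--             ans = max(ans, 1+kk)
--         else:
--             ans = max(ans, kk)
--
--
--     return ans
-- ===== SOURCE B (Python) =====
-- from typing import List
--
-- def maximumProcessableQueries(nums: List[int], queries: List[int]) -> int:
--     # Top-down, demand-driven evaluation of the interval recurrence f(i,j)
--     # (value for remaining interval [i,j]; base f(0,N-1)=0) with an explicit
--     # DFS stack and a flat memo array, instead of A's bottom-up N x N table.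
--     N, M = len(nums), len(queries)
--     memo = [None] * (N * N)       # memo[i*N + j] caches f(i, j)
--     if N > 0:
--         memo[N - 1] = 0           # base cell (0, N-1): nothing removed yet
--
--     def f(i0, j0):
--         stack = [i0 * N + j0]
--         while stack:
--             c = stack.pop()
--             if memo[c] is not None:
--                 continue
--             i, j = divmod(c, N)
--             todo = []
--             if i >= 1 and memo[c - N] is None:
--                 todo.append(c - N)
--             if j + 1 < N and memo[c + 1] is None:
--                 todo.append(c + 1)
--             if todo:
--                 stack.append(c)
--                 stack.extend(todo)
--             else:
--                 best = -1
--                 if i >= 1: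
--                     kk = memo[c - N]
--                     best = kk + 1 if kk < M and nums[i - 1] >= queries[kk] else kk
--                 if j + 1 < N:
--                     kk = memo[c + 1]
--                     cand = kk + 1 if kk < M and nums[j + 1] >= queries[kk] else kk
--                     if cand > best:
--                         best = cand
--                 memo[c] = best
--         return memo[i0 * N + j0]
--
--     ans = 0
--     for i in range(N):
--         kk = f(i, i)
--         cand = kk + 1 if kk < M and nums[i] >= queries[kk] else kk
--         if cand > ans:
--             ans = cand
--     return ans
-- ===== Notes on version B (the rewrite author's own statement) =====
-- stated objective: alternative
-- what changed: Replaces A's bottom-up length-by-length fill of an N x N interval table with a top-down, demand-driven memoized evaluation of the interval recurrence f(i,j), run as an explicit-stack DFS over cell dependencies with a flat one-dimensional cache.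
import Mathlib
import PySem

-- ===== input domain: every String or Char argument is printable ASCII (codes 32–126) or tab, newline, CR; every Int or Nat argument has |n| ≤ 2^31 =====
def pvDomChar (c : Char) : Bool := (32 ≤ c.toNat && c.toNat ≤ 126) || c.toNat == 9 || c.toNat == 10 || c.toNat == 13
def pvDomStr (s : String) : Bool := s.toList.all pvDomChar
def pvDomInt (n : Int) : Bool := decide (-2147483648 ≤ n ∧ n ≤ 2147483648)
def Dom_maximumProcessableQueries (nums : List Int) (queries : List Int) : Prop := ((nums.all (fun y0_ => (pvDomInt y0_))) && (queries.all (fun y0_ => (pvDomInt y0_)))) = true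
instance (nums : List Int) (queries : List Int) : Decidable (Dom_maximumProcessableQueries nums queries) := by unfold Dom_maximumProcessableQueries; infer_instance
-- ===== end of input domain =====

-- ===== PORT A =====
-- B replaces A's bottom-up N x N interval-table fill with a top-down, demand-driven
-- memoized evaluation of the same interval recurrence, run as an explicit-stack DFS
-- over a flat one-dimensional cache (objective: alternative decomposition).

-- dp is Python's N x N list-of-lists table; dp[i][j] reads and dp[i][j] = v writes:
def pvAget (dp : List (List Int)) (i j : Int) : Int :=
  PySem.List.pyGetD (PySem.List.pyGetD dp i []) j 0

def pvAsetL (dp : List (List Int)) (i j v : Int) : List (List Int) :=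
  PySem.List.pySetD dp i (PySem.List.pySetD (PySem.List.pyGetD dp i []) j v)

-- body of the inner `for ii in range(N-ll+1)` loop
def pvAinner (nums queries : List Int) (ll : Int) (dp : List (List Int)) (ii : Int) :
    List (List Int) :=
  let N : Int := nums.length
  let M : Int := queries.length
  let jj := ii + ll - 1
  let dp :=
    if 0 ≤ ii - 1 then
      let kk := pvAget dp (ii - 1) jj
      if kk < M ∧ PySem.List.pyGetD nums (ii - 1) 0 ≥ PySem.List.pyGetD queries kk 0 then
        pvAsetL dp ii jj (max (pvAget dp ii jj) (1 + pvAget dp (ii - 1) jj))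
      else
        pvAsetL dp ii jj (max (pvAget dp ii jj) (pvAget dp (ii - 1) jj))
    else dp
  if jj + 1 < N then
    let kk := pvAget dp ii (jj + 1)
    if kk < M ∧ PySem.List.pyGetD nums (jj + 1) 0 ≥ PySem.List.pyGetD queries kk 0 then
      pvAsetL dp ii jj (max (pvAget dp ii jj) (1 + pvAget dp ii (jj + 1)))
    else
      pvAsetL dp ii jj (max (pvAget dp ii jj) (pvAget dp ii (jj + 1)))
  else dp

-- body of the outer `for ll in range(N, 0, -1)` loop
def pvAouter (nums queries : List Int) (dp : List (List Int)) (ll : Int) :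
    List (List Int) :=
  (PySem.List.pyRange 0 ((nums.length : Int) - ll + 1) 1).foldl (pvAinner nums queries ll) dp

-- body of the final `for ii in range(N)` answer loop
def pvAfin (nums queries : List Int) (dp : List (List Int)) (ans ii : Int) : Int :=
  let M : Int := queries.length
  let kk := pvAget dp ii ii
  if kk < M ∧ PySem.List.pyGetD nums ii 0 ≥ PySem.List.pyGetD queries kk 0 then
    max ans (1 + kk)
  else max ans kk

def maximumProcessableQueries (nums : List Int) (queries : List Int) : Int :=
  let N : Int := nums.length
  let dp0 : List (List Int) := List.replicate nums.length (List.replicate nums.length 0)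
  let dp1 := pvAsetL dp0 0 (N - 1) 0
  let dp2 := (PySem.List.pyRange N 0 (-1)).foldl (pvAouter nums queries) dp1
  (PySem.List.pyRange 0 N 1).foldl (pvAfin nums queries dp2) 0

-- ===== PORT B =====
-- Port of Source B. `memo` is the flat Python list of length N*N (None = not yet computed);
-- the Lean stack list keeps its TOP at the HEAD (Python pops/appends at the END).

-- the `else:` block of the while loop: best computed from the two memoized parents
def pvBbest (nums queries : List Int) (memo : List (Option Int)) (c i j : Int) : Int :=
  let N : Int := nums.length
  let M : Int := queries.length
  let best : Int := -1
  let best :=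
    if 1 ≤ i then
      let kk := (PySem.List.pyGetD memo (c - N) none).getD 0   -- provably `some` when read
      if kk < M ∧ PySem.List.pyGetD nums (i - 1) 0 ≥ PySem.List.pyGetD queries kk 0 then
        kk + 1
      else kk
    else best
  if j + 1 < N then
    let kk := (PySem.List.pyGetD memo (c + 1) none).getD 0     -- provably `some` when read
    let cand :=
      if kk < M ∧ PySem.List.pyGetD nums (j + 1) 0 ≥ PySem.List.pyGetD queries kk 0 then
        kk + 1
      else kk
    if cand > best then cand else best
  else best

-- the `while stack:` loop of f. Python's while loop is ported with a fuel counter that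
-- only makes the recursion structurally total; 3^N fuel is proved sufficient below.
def pvRunB (nums queries : List Int) : Nat → List Int → List (Option Int) → List (Option Int)
  | 0, _, memo => memo
  | _ + 1, [], memo => memo
  | fuel + 1, c :: rest, memo =>
    let N : Int := nums.length
    match PySem.List.pyGetD memo c none with
    | some _ => pvRunB nums queries fuel rest memo
    | none =>
      let i := PySem.Int.floordiv c N        -- i, j = divmod(c, N)
      let j := PySem.Int.mod c N
      let todo :=
        (if 1 ≤ i ∧ PySem.List.pyGetD memo (c - N) none = none then [c - N] else []) ++
        (if j + 1 < N ∧ PySem.List.pyGetD memo (c + 1) none = none then [c + 1] else [])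
      if todo ≠ [] then
        pvRunB nums queries fuel (todo.reverse ++ c :: rest) memo
      else
        pvRunB nums queries fuel rest
          (PySem.List.pySetD memo c (some (pvBbest nums queries memo c i j)))

-- body of the final `for i in range(N)` loop: runs f(i, i), then folds the answer
def pvBloop (nums queries : List Int) (st : List (Option Int) × Int) (i : Int) :
    List (Option Int) × Int :=
  let N : Int := nums.length
  let M : Int := queries.length
  let memo' := pvRunB nums queries (3 ^ nums.length) [i * N + i] st.1
  let kk := (PySem.List.pyGetD memo' (i * N + i) none).getD 0   -- provably `some`
  let cand :=
    if kk < M ∧ PySem.List.pyGetD nums i 0 ≥ PySem.List.pyGetD queries kk 0 then kk + 1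
    else kk
  (memo', if cand > st.2 then cand else st.2)

def maximumProcessableQueries_alt (nums : List Int) (queries : List Int) : Int :=
  let N : Int := nums.length
  let memo0 : List (Option Int) := List.replicate (nums.length * nums.length) none
  let memo1 := if 0 < N then PySem.List.pySetD memo0 (N - 1) (some 0) else memo0
  ((PySem.List.pyRange 0 N 1).foldl (pvBloop nums queries) (memo1, 0)).2

-- ===== PRECONDITION & SPEC =====
-- Pre_ excludes only empty `nums`, on which A raises IndexError (dp[0][N-1] with an empty dp).
def Pre_maximumProcessableQueries (nums : List Int) (queries : List Int) : Prop :=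
  nums ≠ []
instance (nums : List Int) (queries : List Int) :
    Decidable (Pre_maximumProcessableQueries nums queries) := by
  unfold Pre_maximumProcessableQueries; infer_instance

def pvWitness_maximumProcessableQueries : List Int × List Int := ([3, 1, 2], [2, 3])

def Spec_maximumProcessableQueries (nums : List Int) (queries : List Int) (out : Int) : Prop :=
  out = maximumProcessableQueries_alt nums queries
instance (nums : List Int) (queries : List Int) (out : Int) :
    Decidable (Spec_maximumProcessableQueries nums queries out) := by
  unfold Spec_maximumProcessableQueries; infer_instance

-- ===== CLAIM (what is proved, stated in full; the proofs are below) =====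
def Claim_equal_maximumProcessableQueries : Prop := ∀ (nums : List Int) (queries : List Int), Dom_maximumProcessableQueries nums queries → Pre_maximumProcessableQueries nums queries → Spec_maximumProcessableQueries nums queries (maximumProcessableQueries nums queries)

-- ===== LEMMAS AND PROOFS =====

-- step(kk, v) of the recurrence, and the recurrence itself:
-- pvF m i = value of the interval [i, i + (N-1-m)]  (m = number of removed elements)
def pvStep (queries : List Int) (M kk v : Int) : Int :=
  if kk < M ∧ v ≥ PySem.List.pyGetD queries kk 0 then kk + 1 else kk

def pvF (nums queries : List Int) : Nat → Nat → Int
  | 0, _ => 0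
  | m + 1, i =>
    let M : Int := queries.length
    let best : Int := -1
    let best := if 1 ≤ i then
        max best (pvStep queries M (pvF nums queries m (i - 1))
          (PySem.List.pyGetD nums ((i : Int) - 1) 0))
      else best
    if (i : Int) < ((m : Int) + 1) then
      max best (pvStep queries M (pvF nums queries m i)
        (PySem.List.pyGetD nums ((i : Int) + (nums.length : Int) - ((m : Int) + 1)) 0))
    else best

theorem pvStep_ge (queries : List Int) (M kk v : Int) : kk ≤ pvStep queries M kk v := by
  unfold pvStep; split <;> omega

theorem pvF_nonneg (nums queries : List Int) :
    ∀ m i : Nat, 0 ≤ pvF nums queries m i := by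
  intro m
  induction m with
  | zero => intro i; simp [pvF]
  | succ m ih =>
    intro i
    simp only [pvF]
    by_cases h1 : 1 ≤ i
    · rw [if_pos h1]
      by_cases h2 : (i : Int) < ((m : Int) + 1)
      · rw [if_pos h2]
        have := pvStep_ge queries (queries.length : Int) (pvF nums queries m i)
          (PySem.List.pyGetD nums ((i : Int) + (nums.length : Int) - ((m : Int) + 1)) 0)
        have := ih i
        omega
      · rw [if_neg h2]
        have := pvStep_ge queries (queries.length : Int) (pvF nums queries m (i - 1))
          (PySem.List.pyGetD nums ((i : Int) - 1) 0)
        have := ih (i - 1)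
        omega
    · rw [if_neg h1]
      have h2 : (i : Int) < ((m : Int) + 1) := by omega
      rw [if_pos h2]
      have := pvStep_ge queries (queries.length : Int) (pvF nums queries m i)
        (PySem.List.pyGetD nums ((i : Int) + (nums.length : Int) - ((m : Int) + 1)) 0)
      have := ih i
      omega

-- ===== A side: the table computes pvF =====

theorem pvAget_natGet (dp : List (List Int)) (i j : Int) (hi : 0 ≤ i) (hj : 0 ≤ j) :
    pvAget dp i j = (dp.getD i.toNat []).getD j.toNat 0 := by
  obtain ⟨a, rfl⟩ : ∃ a : Nat, i = (a : Int) := ⟨i.toNat, by omega⟩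
  obtain ⟨b, rfl⟩ : ∃ b : Nat, j = (b : Int) := ⟨j.toNat, by omega⟩
  unfold pvAget
  rw [PySem.List.pyGetD_natCast, PySem.List.pyGetD_natCast]
  simp

theorem pvAsetL_natGet (dp : List (List Int)) (a b : Int) (v : Int) (ha : 0 ≤ a) (hb : 0 ≤ b) :
    pvAsetL dp a b v = dp.set a.toNat ((dp.getD a.toNat []).set b.toNat v) := by
  unfold pvAsetL
  rw [PySem.List.pySetD_of_nonneg _ v hb, PySem.List.pySetD_of_nonneg _ _ ha]
  obtain ⟨a', rfl⟩ : ∃ a' : Nat, a = (a' : Int) := ⟨a.toNat, by omega⟩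
  rw [PySem.List.pyGetD_natCast]
  simp

theorem pvAsetL_length (dp : List (List Int)) (a b v : Int) :
    (pvAsetL dp a b v).length = dp.length := by
  unfold pvAsetL
  rw [PySem.List.length_pySetD]

theorem pvAsetL_rows (dp : List (List Int)) (a b v : Int) (ha : 0 ≤ a) (hb : 0 ≤ b) (k : Nat) :
    ((pvAsetL dp a b v).getD k []).length = (dp.getD k []).length := by
  rw [pvAsetL_natGet dp a b v ha hb, List.getD_eq_getElem?_getD, List.getElem?_set]
  by_cases h1 : a.toNat = k
  · subst h1
    by_cases h2 : a.toNat < dp.length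
    · rw [if_pos rfl, if_pos h2, Option.getD_some, List.length_set,
        List.getD_eq_getElem?_getD, List.getElem?_eq_getElem h2]
    · rw [if_pos rfl, if_neg h2, List.getD_eq_getElem?_getD (l := dp),
        List.getElem?_eq_none (by omega)]
  · rw [if_neg h1, List.getD_eq_getElem?_getD]

theorem pvAget_pvAsetL (dp : List (List Int)) (a b i j v : Int)
    (ha : 0 ≤ a) (hb : 0 ≤ b) (hi : 0 ≤ i) (hj : 0 ≤ j)
    (haN : a < (dp.length : Int)) (hbN : b < ((dp.getD a.toNat []).length : Int)) :
    pvAget (pvAsetL dp a b v) i j = if i = a ∧ j = b then v else pvAget dp i j := by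
  rw [pvAget_natGet _ i j hi hj, pvAget_natGet dp i j hi hj, pvAsetL_natGet dp a b v ha hb]
  by_cases h1 : i = a
  · subst h1
    rw [List.getD_eq_getElem?_getD (l := dp.set i.toNat _), List.getElem?_set, if_pos rfl,
      if_pos (show i.toNat < dp.length by omega), Option.getD_some,
      List.getD_eq_getElem?_getD (l := (dp.getD i.toNat []).set b.toNat v), List.getElem?_set]
    by_cases h2 : j = b
    · subst h2
      rw [if_pos rfl, if_pos (show j.toNat < (dp.getD i.toNat []).length by omega),
        Option.getD_some, if_pos ⟨rfl, rfl⟩]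
    · rw [if_neg (show ¬ (b.toNat = j.toNat) by omega),
        if_neg (show ¬ (i = i ∧ j = b) from fun hc => h2 hc.2),
        List.getD_eq_getElem?_getD (l := dp.getD i.toNat [])]
  · rw [List.getD_eq_getElem?_getD (l := dp.set a.toNat _),
      List.getElem?_set_ne (show a.toNat ≠ i.toNat by omega),
      if_neg (show ¬ (i = a ∧ j = b) from fun hc => h1 hc.1),
      List.getD_eq_getElem?_getD (l := dp)]

def pvInv (nums queries : List Int) (dp : List (List Int)) (ll t : Int) : Prop :=
  dp.length = nums.length ∧
  (∀ k : Nat, k < dp.length → (dp.getD k []).length = nums.length) ∧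
  ∀ i j : Int, 0 ≤ i → 0 ≤ j → pvAget dp i j =
    if 0 ≤ i ∧ i ≤ j ∧ j < (nums.length : Int) ∧
        (ll + 1 ≤ j - i + 1 ∨ (j - i + 1 = ll ∧ i < t)) then
      pvF nums queries (nums.length - (j - i + 1).toNat) i.toNat
    else 0

theorem pvAinner_shape (nums queries : List Int) (ll t : Int) (dp : List (List Int))
    (ht : 0 ≤ t) (hll : 1 ≤ ll) :
    (pvAinner nums queries ll dp t).length = dp.length ∧
    ∀ k : Nat, ((pvAinner nums queries ll dp t).getD k []).length = (dp.getD k []).length := by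
  have hjj : (0 : Int) ≤ t + ll - 1 := by omega
  have hr : ∀ (d : List (List Int)) (v : Int) (k : Nat),
      ((pvAsetL d t (t + ll - 1) v).getD k []).length = (d.getD k []).length :=
    fun d v k => pvAsetL_rows d t (t + ll - 1) v ht hjj k
  simp only [pvAinner]
  split_ifs <;> exact ⟨by simp only [pvAsetL_length], fun k => by simp only [hr]⟩

theorem pvAinner_apply (nums queries : List Int) (ll t : Int) (dp : List (List Int))
    (hll : 1 ≤ ll) (ht : 0 ≤ t) (htN : t + ll ≤ (nums.length : Int))
    (hdp : pvInv nums queries dp ll t) (i j : Int) (hi : 0 ≤ i) (hj : 0 ≤ j) :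
    pvAget (pvAinner nums queries ll dp t) i j =
      if i = t ∧ j = t + ll - 1 then
        pvF nums queries (nums.length - ll.toNat) t.toNat
      else pvAget dp i j := by
  obtain ⟨hlen, hrows, hdp⟩ := hdp
  have hsetrange : t < (dp.length : Int) ∧
      t + ll - 1 < ((dp.getD t.toNat []).length : Int) := by
    constructor
    · omega
    · rw [hrows t.toNat (by omega)]; omega
  have f2 : pvAget dp t (t + ll - 1) = 0 := by
    rw [hdp t (t + ll - 1) (by omega) (by omega), if_neg (by omega)]
  have f1 : 1 ≤ t →
      pvAget dp (t - 1) (t + ll - 1) =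
        pvF nums queries (nums.length - (ll + 1).toNat) (t - 1).toNat := by
    intro h1
    rw [hdp (t - 1) (t + ll - 1) (by omega) (by omega),
      if_pos (show _ ∧ _ from ⟨by omega, by omega, by omega, Or.inl (by omega)⟩)]
    have h : (t + ll - 1 - (t - 1) + 1).toNat = (ll + 1).toNat := by omega
    rw [h]
  have f3 : t + ll < (nums.length : Int) →
      pvAget dp t (t + ll) = pvF nums queries (nums.length - (ll + 1).toNat) t.toNat := by
    intro h2
    rw [hdp t (t + ll) (by omega) (by omega),
      if_pos (show _ ∧ _ from ⟨by omega, by omega, by omega, Or.inl (by omega)⟩)]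
    have h : (t + ll - t + 1).toNat = (ll + 1).toNat := by omega
    rw [h]
  have hbr : ∀ (dpp : List (List Int)) (a b kk v : Int),
      (if kk < (queries.length : Int) ∧
          PySem.List.pyGetD nums v 0 ≥ PySem.List.pyGetD queries kk 0 then
        pvAsetL dpp a b (max (pvAget dpp a b) (1 + kk))
      else pvAsetL dpp a b (max (pvAget dpp a b) kk))
      = pvAsetL dpp a b
          (max (pvAget dpp a b)
            (pvStep queries (queries.length : Int) kk (PySem.List.pyGetD nums v 0))) := by
    intro dpp a b kk v
    unfold pvStep
    split
    · rw [show (1 : Int) + kk = kk + 1 from by ring]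
    · rfl
  have hs1 : (0 : Int) ≤ pvStep queries (queries.length : Int)
      (pvF nums queries (nums.length - (ll + 1).toNat) (t - 1).toNat)
      (PySem.List.pyGetD nums (t - 1) 0) :=
    le_trans (pvF_nonneg nums queries _ _) (pvStep_ge ..)
  simp only [pvAinner]
  by_cases hg1 : (0 : Int) ≤ t - 1
  · rw [if_pos hg1, hbr dp t (t + ll - 1) (pvAget dp (t - 1) (t + ll - 1)) (t - 1),
      f1 (by omega), f2]
    by_cases hg2 : t + ll - 1 + 1 < (nums.length : Int)
    · rw [if_pos hg2, hbr]
      have e1 : pvAget (pvAsetL dp t (t + ll - 1)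
          (max 0 (pvStep queries (queries.length : Int)
            (pvF nums queries (nums.length - (ll + 1).toNat) (t - 1).toNat)
            (PySem.List.pyGetD nums (t - 1) 0)))) t (t + ll - 1 + 1) =
          pvF nums queries (nums.length - (ll + 1).toNat) t.toNat := by
        rw [pvAget_pvAsetL dp t (t + ll - 1) t (t + ll - 1 + 1) _ (by omega) (by omega)
          (by omega) (by omega) hsetrange.1 hsetrange.2, if_neg (by omega),
          show t + ll - 1 + 1 = t + ll from by ring]
        exact f3 (by omega)
      have e2 : pvAget (pvAsetL dp t (t + ll - 1)
          (max 0 (pvStep queries (queries.length : Int)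
            (pvF nums queries (nums.length - (ll + 1).toNat) (t - 1).toNat)
            (PySem.List.pyGetD nums (t - 1) 0)))) t (t + ll - 1) =
          max 0 (pvStep queries (queries.length : Int)
            (pvF nums queries (nums.length - (ll + 1).toNat) (t - 1).toNat)
            (PySem.List.pyGetD nums (t - 1) 0)) := by
        rw [pvAget_pvAsetL dp t (t + ll - 1) t (t + ll - 1) _ (by omega) (by omega)
          (by omega) (by omega) hsetrange.1 hsetrange.2, if_pos ⟨rfl, rfl⟩]
      rw [e1, e2]
      have hset2 : t < ((pvAsetL dp t (t + ll - 1)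
          (max 0 (pvStep queries (queries.length : Int)
            (pvF nums queries (nums.length - (ll + 1).toNat) (t - 1).toNat)
            (PySem.List.pyGetD nums (t - 1) 0)))).length : Int) := by
        rw [pvAsetL_length]; omega
      have hset2r : t + ll - 1 < (((pvAsetL dp t (t + ll - 1)
          (max 0 (pvStep queries (queries.length : Int)
            (pvF nums queries (nums.length - (ll + 1).toNat) (t - 1).toNat)
            (PySem.List.pyGetD nums (t - 1) 0)))).getD t.toNat []).length : Int) := by
        rw [pvAsetL_rows _ _ _ _ (by omega) (by omega)]; exact hsetrange.2
      rw [pvAget_pvAsetL _ t (t + ll - 1) i j _ (by omega) (by omega) hi hj hset2 hset2r]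
      by_cases hij : i = t ∧ j = t + ll - 1
      · rw [if_pos hij, if_pos hij]
        have hm : nums.length - ll.toNat = (nums.length - (ll + 1).toNat) + 1 := by omega
        rw [hm]
        simp only [pvF]
        have hg1' : 1 ≤ t.toNat := by omega
        rw [if_pos hg1']
        have hcast : ((t.toNat : Nat) : Int) = t := by omega
        rw [hcast]
        have hg2' : t < ((nums.length - (ll + 1).toNat : Nat) : Int) + 1 := by omega
        rw [if_pos hg2']
        have hidx : t + (nums.length : Int) - (((nums.length - (ll + 1).toNat : Nat) : Int) + 1) =
            t + ll - 1 + 1 := by omega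
        rw [hidx]
        have htn : t.toNat - 1 = (t - 1).toNat := by omega
        rw [htn]
        rw [max_eq_right hs1, max_eq_right (le_trans (by norm_num) hs1)]
      · rw [if_neg hij, if_neg hij,
          pvAget_pvAsetL dp t (t + ll - 1) i j _ (by omega) (by omega) hi hj
            hsetrange.1 hsetrange.2, if_neg hij]
    · rw [if_neg hg2]
      rw [pvAget_pvAsetL dp t (t + ll - 1) i j _ (by omega) (by omega) hi hj
        hsetrange.1 hsetrange.2]
      by_cases hij : i = t ∧ j = t + ll - 1
      · rw [if_pos hij, if_pos hij]
        have hm : nums.length - ll.toNat = (nums.length - (ll + 1).toNat) + 1 := by omega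
        rw [hm]
        simp only [pvF]
        have hg1' : 1 ≤ t.toNat := by omega
        rw [if_pos hg1']
        have hcast : ((t.toNat : Nat) : Int) = t := by omega
        rw [hcast]
        have hg2' : ¬ (t < ((nums.length - (ll + 1).toNat : Nat) : Int) + 1) := by omega
        rw [if_neg hg2']
        have htn : t.toNat - 1 = (t - 1).toNat := by omega
        rw [htn]
        rw [max_eq_right hs1, max_eq_right (le_trans (by norm_num) hs1)]
      · rw [if_neg hij, if_neg hij]
  · rw [if_neg hg1]
    by_cases hg2 : t + ll - 1 + 1 < (nums.length : Int)
    · rw [if_pos hg2, hbr,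
        show t + ll - 1 + 1 = t + ll from by ring, f3 (by omega), f2]
      rw [pvAget_pvAsetL dp t (t + ll - 1) i j _ (by omega) (by omega) hi hj
        hsetrange.1 hsetrange.2]
      by_cases hij : i = t ∧ j = t + ll - 1
      · rw [if_pos hij, if_pos hij]
        have hm : nums.length - ll.toNat = (nums.length - (ll + 1).toNat) + 1 := by omega
        rw [hm]
        simp only [pvF]
        have ht0 : t = 0 := by omega
        have hg1' : ¬ (1 ≤ t.toNat) := by omega
        rw [if_neg hg1']
        have hcast : ((t.toNat : Nat) : Int) = t := by omega
        rw [hcast]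
        have hg2' : t < ((nums.length - (ll + 1).toNat : Nat) : Int) + 1 := by omega
        rw [if_pos hg2']
        have hidx : t + (nums.length : Int) - (((nums.length - (ll + 1).toNat : Nat) : Int) + 1) =
            t + ll := by omega
        rw [hidx]
        have hs2' : (0 : Int) ≤ pvStep queries (queries.length : Int)
            (pvF nums queries (nums.length - (ll + 1).toNat) t.toNat)
            (PySem.List.pyGetD nums (t + ll) 0) :=
          le_trans (pvF_nonneg nums queries _ _) (pvStep_ge ..)
        rw [max_eq_right hs2', max_eq_right (le_trans (by norm_num) hs2')]
      · rw [if_neg hij, if_neg hij]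
    · rw [if_neg hg2]
      by_cases hij : i = t ∧ j = t + ll - 1
      · rw [if_pos hij, hij.1, hij.2, f2]
        have hm : nums.length - ll.toNat = 0 := by omega
        rw [hm]
        rfl
      · rw [if_neg hij]

theorem pvA_inner_step (nums queries : List Int) (ll t : Int) (dp : List (List Int))
    (hll : 1 ≤ ll) (ht : 0 ≤ t) (htN : t + ll ≤ (nums.length : Int))
    (hdp : pvInv nums queries dp ll t) :
    pvInv nums queries (pvAinner nums queries ll dp t) ll (t + 1) := by
  obtain ⟨hsl, hsr⟩ := pvAinner_shape nums queries ll t dp ht hll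
  refine ⟨by rw [hsl]; exact hdp.1, fun k hk => by rw [hsr k]; exact hdp.2.1 k (by omega), ?_⟩
  intro i j hi hj
  rw [pvAinner_apply nums queries ll t dp hll ht htN hdp i j hi hj]
  by_cases hij : i = t ∧ j = t + ll - 1
  · obtain ⟨h1, h2⟩ := hij
    subst h1; subst h2
    rw [if_pos ⟨rfl, rfl⟩,
      if_pos (show 0 ≤ i ∧ i ≤ i + ll - 1 ∧ i + ll - 1 < (nums.length : Int) ∧
        (ll + 1 ≤ i + ll - 1 - i + 1 ∨ (i + ll - 1 - i + 1 = ll ∧ i < i + 1)) by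
          refine ⟨by omega, by omega, by omega, Or.inr ⟨by omega, by omega⟩⟩)]
    have h3 : (i + ll - 1 - i + 1).toNat = ll.toNat := by omega
    rw [h3]
  · rw [if_neg hij, hdp.2.2 i j hi hj]
    by_cases hc : 0 ≤ i ∧ i ≤ j ∧ j < (nums.length : Int) ∧
        (ll + 1 ≤ j - i + 1 ∨ (j - i + 1 = ll ∧ i < t))
    · rw [if_pos hc, if_pos (by omega)]
    · rw [if_neg hc, if_neg (by omega)]

theorem pvA_inner_fold (nums queries : List Int) (ll : Int) (hll : 1 ≤ ll)
    (hllN : ll ≤ (nums.length : Int)) :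
    ∀ (k : Nat) (t : Int) (dp : List (List Int)),
      t = (nums.length : Int) - ll + 1 - k → 0 ≤ t → pvInv nums queries dp ll t →
      pvInv nums queries
        ((PySem.List.pyRange t ((nums.length : Int) - ll + 1) 1).foldl
          (pvAinner nums queries ll) dp) ll ((nums.length : Int) - ll + 1) := by
  intro k
  induction k with
  | zero =>
    intro t dp htk ht hdp
    have : t = (nums.length : Int) - ll + 1 := by omega
    subst this
    rw [PySem.List.pyRange_one_eq_nil (le_refl _), List.foldl_nil]
    exact hdp
  | succ k ih =>
    intro t dp htk ht hdp
    by_cases hlt : t < (nums.length : Int) - ll + 1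
    · rw [PySem.List.pyRange_one_cons hlt, List.foldl_cons]
      exact ih (t + 1) _ (by omega) (by omega)
        (pvA_inner_step nums queries ll t dp hll ht (by omega) hdp)
    · have : t = (nums.length : Int) - ll + 1 := by omega
      subst this
      rw [PySem.List.pyRange_one_eq_nil (le_refl _), List.foldl_nil]
      exact hdp

theorem pvInv_shift (nums queries : List Int) (dp : List (List Int)) (ll : Int)
    (hll : 1 ≤ ll)
    (hdp : pvInv nums queries dp ll ((nums.length : Int) - ll + 1)) :
    pvInv nums queries dp (ll - 1) 0 := by
  refine ⟨hdp.1, hdp.2.1, ?_⟩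
  intro i j hi hj
  rw [hdp.2.2 i j hi hj]
  by_cases hc : 0 ≤ i ∧ i ≤ j ∧ j < (nums.length : Int) ∧
      (ll + 1 ≤ j - i + 1 ∨ (j - i + 1 = ll ∧ i < (nums.length : Int) - ll + 1))
  · rw [if_pos hc, if_pos (show 0 ≤ i ∧ i ≤ j ∧ j < (nums.length : Int) ∧
      (ll - 1 + 1 ≤ j - i + 1 ∨ (j - i + 1 = ll - 1 ∧ i < 0)) by omega)]
  · rw [if_neg hc, if_neg (show ¬ (0 ≤ i ∧ i ≤ j ∧ j < (nums.length : Int) ∧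
      (ll - 1 + 1 ≤ j - i + 1 ∨ (j - i + 1 = ll - 1 ∧ i < 0))) by omega)]

theorem pvA_outer_fold (nums queries : List Int) :
    ∀ (k : Nat) (ll : Int) (dp : List (List Int)), ll = (k : Int) →
      ll ≤ (nums.length : Int) → pvInv nums queries dp ll 0 →
      pvInv nums queries
        ((PySem.List.pyRange ll 0 (-1)).foldl (pvAouter nums queries) dp) 0 0 := by
  intro k
  induction k with
  | zero =>
    intro ll dp hk hN hdp
    subst hk
    rw [PySem.List.pyRange_neg_one_eq_nil (by norm_num), List.foldl_nil]
    exact hdp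
  | succ k ih =>
    intro ll dp hk hN hdp
    have h0 : (0 : Int) < ll := by omega
    rw [PySem.List.pyRange_neg_one_cons h0, List.foldl_cons]
    have hinner := pvA_inner_fold nums queries ll (by omega) hN
      ((nums.length : Int) - ll + 1).toNat 0 dp (by omega) (by omega) hdp
    have houter : pvAouter nums queries dp ll =
        (PySem.List.pyRange 0 ((nums.length : Int) - ll + 1) 1).foldl
          (pvAinner nums queries ll) dp := rfl
    exact ih (ll - 1) _ (by omega) (by omega)
      (pvInv_shift nums queries _ ll (by omega) (by rw [houter]; exact hinner))

-- ===== B side: the stack machine computes pvF =====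

-- flat-cell coordinates, validity, and level (number of removed elements)
def pvI (N c : Int) : Int := PySem.Int.floordiv c N
def pvJ (N c : Int) : Int := PySem.Int.mod c N
def pvValidC (N c : Int) : Prop := 0 ≤ c ∧ 0 ≤ pvI N c ∧ pvI N c ≤ pvJ N c ∧ pvJ N c < N
def pvLvl (N c : Int) : Nat := (pvI N c + (N - 1 - pvJ N c)).toNat

theorem pvIJ_encode (N i j : Int) (hN : 0 < N) (hj : 0 ≤ j) (hjN : j < N) :
    pvI N (i * N + j) = i ∧ pvJ N (i * N + j) = j := by
  unfold pvI pvJ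
  rw [PySem.Int.floordiv_eq_ediv_of_pos hN, PySem.Int.mod_eq_emod_of_pos hN,
    show i * N + j = j + i * N from by ring]
  constructor
  · rw [Int.add_mul_ediv_right j i (by omega), Int.ediv_eq_zero_of_lt hj hjN]
    omega
  · rw [Int.add_mul_emod_self_right, Int.emod_eq_of_lt hj hjN]

theorem pvC_decomp (N c : Int) : pvI N c * N + pvJ N c = c :=
  PySem.Int.floordiv_mul_add_mod c N

theorem pvValidC_lt (N c : Int) (hN : 0 < N) (hv : pvValidC N c) : c < N * N := by
  obtain ⟨hc0, hi0, hij, hjN⟩ := hv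
  have hd := pvC_decomp N c
  have h1 : pvI N c * N ≤ (N - 1) * N :=
    mul_le_mul_of_nonneg_right (by omega) (by omega)
  have h2 : (N - 1) * N = N * N - N := by ring
  omega

theorem pvNbrL (N c : Int) (hN : 0 < N) (hv : pvValidC N c) (hi : 1 ≤ pvI N c) :
    pvValidC N (c - N) ∧ pvI N (c - N) = pvI N c - 1 ∧ pvJ N (c - N) = pvJ N c ∧
      pvLvl N (c - N) + 1 = pvLvl N c := by
  obtain ⟨hc0, hi0, hij, hjN⟩ := hv
  have hd := pvC_decomp N c
  have hrw : c - N = (pvI N c - 1) * N + pvJ N c := by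
    have h' : (pvI N c - 1) * N = pvI N c * N - N := by ring
    omega
  obtain ⟨e1, e2⟩ := pvIJ_encode N (pvI N c - 1) (pvJ N c) hN (by omega) hjN
  rw [hrw]
  refine ⟨⟨?_, by rw [e1]; omega, by rw [e1, e2]; omega, by rw [e2]; omega⟩,
    e1, e2, ?_⟩
  · have := mul_nonneg (show (0 : Int) ≤ pvI N c - 1 by omega) (le_of_lt hN)
    omega
  · unfold pvLvl
    rw [e1, e2]
    omega

theorem pvNbrR (N c : Int) (hN : 0 < N) (hv : pvValidC N c) (hj : pvJ N c + 1 < N) :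
    pvValidC N (c + 1) ∧ pvI N (c + 1) = pvI N c ∧ pvJ N (c + 1) = pvJ N c + 1 ∧
      pvLvl N (c + 1) + 1 = pvLvl N c := by
  obtain ⟨hc0, hi0, hij, hjN⟩ := hv
  have hd := pvC_decomp N c
  have hrw : c + 1 = pvI N c * N + (pvJ N c + 1) := by
    omega
  obtain ⟨e1, e2⟩ := pvIJ_encode N (pvI N c) (pvJ N c + 1) hN (by omega) hj
  rw [hrw]
  refine ⟨⟨by omega, by rw [e1]; omega, by rw [e1, e2]; omega, by rw [e2]; omega⟩,
    e1, e2, ?_⟩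
  unfold pvLvl
  rw [e1, e2]
  omega

theorem pvBaseCell (N : Int) (hN : 0 < N) :
    pvI N (N - 1) = 0 ∧ pvJ N (N - 1) = N - 1 ∧ pvValidC N (N - 1) ∧ pvLvl N (N - 1) = 0 := by
  have h := pvIJ_encode N 0 (N - 1) hN (by omega) (by omega)
  rw [show (0 : Int) * N + (N - 1) = N - 1 from by ring] at h
  refine ⟨h.1, h.2, ⟨by omega, by rw [h.1], by rw [h.1, h.2]; omega, by rw [h.2]; omega⟩, ?_⟩
  unfold pvLvl
  rw [h.1, h.2]
  omega

theorem pvLvl_zero_eq (N c : Int) (hN : 0 < N) (hv : pvValidC N c)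
    (h0 : pvLvl N c = 0) : c = N - 1 := by
  obtain ⟨hc0, hi0, hij, hjN⟩ := hv
  have hd := pvC_decomp N c
  unfold pvLvl at h0
  have hi : pvI N c = 0 := by omega
  have hj : pvJ N c = N - 1 := by omega
  rw [hi, hj] at hd
  simp at hd
  omega

-- reading / writing the flat memo at nonnegative indices
theorem pvMemoGetSet (memo : List (Option Int)) (c c' : Int) (v : Option Int)
    (hc : 0 ≤ c) (hlt : c < (memo.length : Int)) (hc' : 0 ≤ c') :
    PySem.List.pyGetD (PySem.List.pySetD memo c v) c' none =
      if c' = c then v else PySem.List.pyGetD memo c' none := by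
  obtain ⟨n, rfl⟩ : ∃ n : Nat, c = (n : Int) := ⟨c.toNat, by omega⟩
  obtain ⟨m, rfl⟩ : ∃ m : Nat, c' = (m : Int) := ⟨c'.toNat, by omega⟩
  rw [PySem.List.pyGetD_pySetD_natCast memo n m v none (by exact_mod_cast hlt)]
  by_cases h : m = n
  · rw [if_pos h, if_pos (by exact_mod_cast h)]
  · rw [if_neg h, if_neg (by exact_mod_cast fun hh => h (by exact_mod_cast hh))]

theorem pvRepGet (n : Nat) (c : Int) :
    PySem.List.pyGetD (List.replicate n (none : Option Int)) c none = none := by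
  unfold PySem.List.pyGetD
  simp [PySem.List.pyGet?]
  cases h : PySem.List.pyIdx? n c with
  | none => simp
  | some a =>
    simp [List.getElem?_replicate]
    split <;> rfl

-- memo extension (only new cells are ever written)
def pvMemoLe (m1 m2 : List (Option Int)) : Prop :=
  ∀ c v, 0 ≤ c → PySem.List.pyGetD m1 c none = some v →
    PySem.List.pyGetD m2 c none = some v

theorem pvMemoLe_refl (m : List (Option Int)) : pvMemoLe m m := fun _ _ _ h => h

theorem pvMemoLe_trans {m1 m2 m3 : List (Option Int)} (h1 : pvMemoLe m1 m2)
    (h2 : pvMemoLe m2 m3) : pvMemoLe m1 m3 :=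
  fun c v hc h => h2 c v hc (h1 c v hc h)

-- the cache invariant
def pvGood (nums queries : List Int) (memo : List (Option Int)) : Prop :=
  memo.length = nums.length * nums.length ∧
  PySem.List.pyGetD memo ((nums.length : Int) - 1) none = some 0 ∧
  ∀ c v, 0 ≤ c → PySem.List.pyGetD memo c none = some v →
    pvValidC (nums.length : Int) c ∧
      v = pvF nums queries (pvLvl (nums.length : Int) c) (pvI (nums.length : Int) c).toNat

theorem pvGood_N_pos (nums queries : List Int) (memo : List (Option Int))
    (hg : pvGood nums queries memo) : 0 < (nums.length : Int) := by
  rcases Nat.eq_zero_or_pos nums.length with h | h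
  · exfalso
    have hlen : memo.length = 0 := by rw [hg.1, h]
    have : memo = [] := List.length_eq_zero_iff.mp hlen
    rw [this] at hg
    have h2 := hg.2.1
    have h3 := pvRepGet 0 ((nums.length : Int) - 1)
    rw [List.replicate_zero] at h3
    rw [h3] at h2
    exact (by simp at h2)
  · exact_mod_cast h

theorem pvIfMax (a b : Int) : (if b > a then b else a) = max a b := by
  rw [max_def]
  split_ifs <;> omega

-- the resolved value equals pvF
theorem pvBbest_eq (nums queries : List Int) (memo : List (Option Int)) (c : Int)
    (hg : pvGood nums queries memo) (hv : pvValidC (nums.length : Int) c)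
    (hm1 : 1 ≤ pvLvl (nums.length : Int) c)
    (hl : 1 ≤ pvI (nums.length : Int) c →
      PySem.List.pyGetD memo (c - (nums.length : Int)) none ≠ none)
    (hr : pvJ (nums.length : Int) c + 1 < (nums.length : Int) →
      PySem.List.pyGetD memo (c + 1) none ≠ none) :
    pvBbest nums queries memo c (pvI (nums.length : Int) c) (pvJ (nums.length : Int) c) =
      pvF nums queries (pvLvl (nums.length : Int) c) (pvI (nums.length : Int) c).toNat := by
  have hN : 0 < (nums.length : Int) := pvGood_N_pos nums queries memo hg
  obtain ⟨m', hm'⟩ : ∃ m', pvLvl (nums.length : Int) c = m' + 1 :=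
    ⟨pvLvl (nums.length : Int) c - 1, by omega⟩
  have hvc := hv
  obtain ⟨hc0, hi0, hij, hjN⟩ := hvc
  have hlvlInt : pvI (nums.length : Int) c +
      ((nums.length : Int) - 1 - pvJ (nums.length : Int) c) = (m' : Int) + 1 := by
    unfold pvLvl at hm'
    omega
  rw [hm']
  simp only [pvBbest, pvF]
  have hg1 : (1 ≤ pvI (nums.length : Int) c) ↔ (1 ≤ (pvI (nums.length : Int) c).toNat) := by
    omega
  have hg2 : (pvJ (nums.length : Int) c + 1 < (nums.length : Int)) ↔
      (((pvI (nums.length : Int) c).toNat : Int) < ((m' : Int) + 1)) := by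
    omega
  have hidx1 : ((pvI (nums.length : Int) c).toNat : Int) - 1 = pvI (nums.length : Int) c - 1 := by
    omega
  have hidx2 : ((pvI (nums.length : Int) c).toNat : Int) + (nums.length : Int)
      - ((m' : Int) + 1) = pvJ (nums.length : Int) c + 1 := by
    omega
  by_cases h1 : 1 ≤ pvI (nums.length : Int) c
  · obtain ⟨vL, hvL⟩ : ∃ vL, PySem.List.pyGetD memo (c - (nums.length : Int)) none = some vL := by
      cases hx : PySem.List.pyGetD memo (c - (nums.length : Int)) none with
      | none => exact absurd hx (hl h1)
      | some vv => exact ⟨vv, rfl⟩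
    obtain ⟨hLval, hLi, hLj, hLlvl⟩ := pvNbrL (nums.length : Int) c hN hv h1
    obtain ⟨_, hvLeq⟩ := hg.2.2 (c - (nums.length : Int)) vL hLval.1 hvL
    have hvLF : pvF nums queries m' ((pvI (nums.length : Int) c).toNat - 1) = vL := by
      rw [hvLeq, hLi]
      congr 1 <;> omega
    have eL : (if vL < (queries.length : Int) ∧
          PySem.List.pyGetD nums (pvI (nums.length : Int) c - 1) 0 ≥
            PySem.List.pyGetD queries vL 0 then vL + 1 else vL) =
        pvStep queries (queries.length : Int) vL
          (PySem.List.pyGetD nums (pvI (nums.length : Int) c - 1) 0) := rfl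
    have hL0 : (0 : Int) ≤ pvStep queries (queries.length : Int) vL
        (PySem.List.pyGetD nums (pvI (nums.length : Int) c - 1) 0) := by
      rw [← hvLF]
      exact le_trans (pvF_nonneg nums queries _ _) (pvStep_ge ..)
    rw [if_pos h1, if_pos (hg1.mp h1), hvL, Option.getD_some, eL, hidx1, hvLF,
      max_eq_right (le_trans (by norm_num) hL0)]
    by_cases h2 : pvJ (nums.length : Int) c + 1 < (nums.length : Int)
    · obtain ⟨vR, hvR⟩ : ∃ vR, PySem.List.pyGetD memo (c + 1) none = some vR := by
        cases hx : PySem.List.pyGetD memo (c + 1) none with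
        | none => exact absurd hx (hr h2)
        | some vv => exact ⟨vv, rfl⟩
      obtain ⟨hRval, hRi, hRj, hRlvl⟩ := pvNbrR (nums.length : Int) c hN hv h2
      obtain ⟨_, hvReq⟩ := hg.2.2 (c + 1) vR hRval.1 hvR
      have hvRF : pvF nums queries m' (pvI (nums.length : Int) c).toNat = vR := by
        rw [hvReq, hRi]
        congr 1
        omega
      have eR : (if vR < (queries.length : Int) ∧
            PySem.List.pyGetD nums (pvJ (nums.length : Int) c + 1) 0 ≥
              PySem.List.pyGetD queries vR 0 then vR + 1 else vR) =
          pvStep queries (queries.length : Int) vR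
            (PySem.List.pyGetD nums (pvJ (nums.length : Int) c + 1) 0) := rfl
      rw [if_pos h2, if_pos (hg2.mp h2), hvR, Option.getD_some, eR, hidx2, hvRF, pvIfMax]
    · rw [if_neg h2, if_neg (fun hh => h2 (hg2.mpr hh))]
  · have h2 : pvJ (nums.length : Int) c + 1 < (nums.length : Int) := by omega
    obtain ⟨vR, hvR⟩ : ∃ vR, PySem.List.pyGetD memo (c + 1) none = some vR := by
      cases hx : PySem.List.pyGetD memo (c + 1) none with
      | none => exact absurd hx (hr h2)
      | some vv => exact ⟨vv, rfl⟩
    obtain ⟨hRval, hRi, hRj, hRlvl⟩ := pvNbrR (nums.length : Int) c hN hv h2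
    obtain ⟨_, hvReq⟩ := hg.2.2 (c + 1) vR hRval.1 hvR
    have hvRF : pvF nums queries m' (pvI (nums.length : Int) c).toNat = vR := by
      rw [hvReq, hRi]
      congr 1
      omega
    have eR : (if vR < (queries.length : Int) ∧
          PySem.List.pyGetD nums (pvJ (nums.length : Int) c + 1) 0 ≥
            PySem.List.pyGetD queries vR 0 then vR + 1 else vR) =
        pvStep queries (queries.length : Int) vR
          (PySem.List.pyGetD nums (pvJ (nums.length : Int) c + 1) 0) := rfl
    have hR0 : (0 : Int) ≤ pvStep queries (queries.length : Int) vR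
        (PySem.List.pyGetD nums (pvJ (nums.length : Int) c + 1) 0) := by
      rw [← hvRF]
      exact le_trans (pvF_nonneg nums queries _ _) (pvStep_ge ..)
    rw [if_neg h1, if_neg (fun hh => h1 (hg1.mpr hh)), if_pos h2, if_pos (hg2.mp h2),
      hvR, Option.getD_some, eR, hidx2, hvRF, pvIfMax, max_eq_right (by omega)]

-- one full iteration when the cell is memoized or both parents are: it pops and caches c
theorem pvFinishCell (nums queries : List Int) (c : Int) (rest : List Int)
    (memo : List (Option Int)) (fuel : Nat)
    (hg : pvGood nums queries memo) (hv : pvValidC (nums.length : Int) c)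
    (hready : PySem.List.pyGetD memo c none = none →
      (1 ≤ pvI (nums.length : Int) c →
        PySem.List.pyGetD memo (c - (nums.length : Int)) none ≠ none) ∧
      (pvJ (nums.length : Int) c + 1 < (nums.length : Int) →
        PySem.List.pyGetD memo (c + 1) none ≠ none)) :
    ∃ memo', pvRunB nums queries (fuel + 1) (c :: rest) memo =
        pvRunB nums queries fuel rest memo' ∧
      pvGood nums queries memo' ∧ pvMemoLe memo memo' ∧
      PySem.List.pyGetD memo' c none ≠ none := by
  have hN : 0 < (nums.length : Int) := pvGood_N_pos nums queries memo hg
  have hc0 : 0 ≤ c := hv.1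
  have hclt : c < (memo.length : Int) := by
    have := pvValidC_lt (nums.length : Int) c hN hv
    rw [hg.1]
    push_cast
    omega
  cases hmc : PySem.List.pyGetD memo c none with
  | some v =>
    refine ⟨memo, ?_, hg, pvMemoLe_refl memo, by rw [hmc]; simp⟩
    simp only [pvRunB, hmc]
  | none =>
    obtain ⟨hlp, hrp⟩ := hready hmc
    have hm1 : 1 ≤ pvLvl (nums.length : Int) c := by
      by_contra h
      have h0 : pvLvl (nums.length : Int) c = 0 := by omega
      have hcN := pvLvl_zero_eq (nums.length : Int) c hN hv h0
      rw [hcN, hg.2.1] at hmc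
      exact absurd hmc (by simp)
    have hIdef : PySem.Int.floordiv c (nums.length : Int) = pvI (nums.length : Int) c := rfl
    have hJdef : PySem.Int.mod c (nums.length : Int) = pvJ (nums.length : Int) c := rfl
    have ht1 : ¬ (1 ≤ pvI (nums.length : Int) c ∧
        PySem.List.pyGetD memo (c - (nums.length : Int)) none = none) :=
      fun hh => hlp hh.1 hh.2
    have ht2 : ¬ (pvJ (nums.length : Int) c + 1 < (nums.length : Int) ∧
        PySem.List.pyGetD memo (c + 1) none = none) :=
      fun hh => hrp hh.1 hh.2
    have hbne : ¬ ((nums.length : Int) - 1 = c) := by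
      intro h
      rw [← h, hg.2.1] at hmc
      exact absurd hmc (by simp)
    refine ⟨PySem.List.pySetD memo c
        (some (pvBbest nums queries memo c (pvI (nums.length : Int) c)
          (pvJ (nums.length : Int) c))), ?_, ?_, ?_, ?_⟩
    · simp only [pvRunB, hmc, hIdef, hJdef, if_neg ht1, if_neg ht2]
      simp
    · refine ⟨by rw [PySem.List.length_pySetD]; exact hg.1, ?_, ?_⟩
      · rw [pvMemoGetSet memo c _ _ hc0 hclt (by omega), if_neg hbne]
        exact hg.2.1
      · intro c' v' hc' hv'
        rw [pvMemoGetSet memo c c' _ hc0 hclt hc'] at hv'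
        by_cases hcc : c' = c
        · subst hcc
          rw [if_pos rfl] at hv'
          have hveq : v' = pvBbest nums queries memo c' (pvI (nums.length : Int) c')
              (pvJ (nums.length : Int) c') := by
            injection hv' with h'
            omega
          exact ⟨hv, by rw [hveq, pvBbest_eq nums queries memo c' hg hv hm1 hlp hrp]⟩
        · rw [if_neg hcc] at hv'
          exact hg.2.2 c' v' hc' hv'
    · intro c' v' hc' hv'
      rw [pvMemoGetSet memo c c' _ hc0 hclt hc',
        if_neg (fun h => by rw [h, hmc] at hv'; exact absurd hv' (by simp))]
      exact hv'
    · rw [pvMemoGetSet memo c c _ hc0 hclt hc0, if_pos rfl]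
      simp

-- ≠ none survives memo extension
theorem pvMemoLe_ne {m1 m2 : List (Option Int)} (hle : pvMemoLe m1 m2) (x : Int)
    (hx : 0 ≤ x) (h : PySem.List.pyGetD m1 x none ≠ none) :
    PySem.List.pyGetD m2 x none ≠ none := by
  cases hh : PySem.List.pyGetD m1 x none with
  | none => exact absurd hh h
  | some v => rw [hle x v hx hh]; simp

-- the main simulation: enough fuel fully resolves a cell
theorem pvRunB_one (nums queries : List Int) :
    ∀ (m : Nat) (c : Int) (rest : List Int) (memo : List (Option Int)) (fuel : Nat),
      pvGood nums queries memo → pvValidC (nums.length : Int) c →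
      pvLvl (nums.length : Int) c = m → 3 ^ (m + 1) ≤ fuel →
      ∃ (memo' : List (Option Int)) (fuel' : Nat),
        pvRunB nums queries fuel (c :: rest) memo = pvRunB nums queries fuel' rest memo' ∧
        pvGood nums queries memo' ∧ pvMemoLe memo memo' ∧
        PySem.List.pyGetD memo' c none ≠ none ∧
        fuel ≤ fuel' + 3 ^ (m + 1) := by
  intro m
  induction m using Nat.strong_induction_on with
  | _ m IH =>
    intro c rest memo fuel hg hv hm hfuel
    have hN : 0 < (nums.length : Int) := pvGood_N_pos nums queries memo hg
    have hX1 : 1 ≤ 3 ^ (m + 1) := Nat.one_le_pow _ _ (by norm_num)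
    have hc0 : 0 ≤ c := hv.1
    obtain ⟨f, rfl⟩ : ∃ f, fuel = f + 1 := ⟨fuel - 1, by omega⟩
    cases hmc : PySem.List.pyGetD memo c none with
    | some v =>
      obtain ⟨memo', heq, hg', hle, hsome⟩ := pvFinishCell nums queries c rest memo f hg hv
        (fun h => by rw [hmc] at h; cases h)
      exact ⟨memo', f, heq, hg', hle, hsome, by omega⟩
    | none =>
      have hm1 : 1 ≤ pvLvl (nums.length : Int) c := by
        by_contra h
        have h0 : pvLvl (nums.length : Int) c = 0 := by omega
        have hcN := pvLvl_zero_eq (nums.length : Int) c hN hv h0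
        rw [hcN, hg.2.1] at hmc
        exact absurd hmc (by simp)
      obtain ⟨m', rfl⟩ : ∃ m', m = m' + 1 := ⟨m - 1, by omega⟩
      have hX : 1 ≤ 3 ^ (m' + 1) := Nat.one_le_pow _ _ (by norm_num)
      have hpow : 3 ^ (m' + 1 + 1) = 3 * 3 ^ (m' + 1) := by
        rw [pow_succ]
        ring
      have hIdef : PySem.Int.floordiv c (nums.length : Int) = pvI (nums.length : Int) c := rfl
      have hJdef : PySem.Int.mod c (nums.length : Int) = pvJ (nums.length : Int) c := rfl
      by_cases hp1 : 1 ≤ pvI (nums.length : Int) c ∧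
          PySem.List.pyGetD memo (c - (nums.length : Int)) none = none
      · obtain ⟨hLval, hLi, hLj, hLlvl⟩ := pvNbrL (nums.length : Int) c hN hv hp1.1
        have hLm : pvLvl (nums.length : Int) (c - (nums.length : Int)) = m' := by omega
        by_cases hp2 : pvJ (nums.length : Int) c + 1 < (nums.length : Int) ∧
            PySem.List.pyGetD memo (c + 1) none = none
        · -- both parents pushed: stack becomes (c+1) :: (c-N) :: c :: rest
          obtain ⟨hRval, hRi, hRj, hRlvl⟩ := pvNbrR (nums.length : Int) c hN hv hp2.1
          have hRm : pvLvl (nums.length : Int) (c + 1) = m' := by omega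
          have heq0 : pvRunB nums queries (f + 1) (c :: rest) memo =
              pvRunB nums queries f
                ((c + 1) :: (c - (nums.length : Int)) :: c :: rest) memo := by
            simp only [pvRunB, hmc, hIdef, hJdef, if_pos hp1, if_pos hp2]
            simp
          obtain ⟨memo1, f1, heq1, hg1, hle1, hsome1, hf1⟩ :=
            IH m' (by omega) (c + 1) ((c - (nums.length : Int)) :: c :: rest) memo f
              hg hRval hRm (by omega)
          obtain ⟨memo2, f2, heq2, hg2, hle2, hsome2, hf2⟩ :=
            IH m' (by omega) (c - (nums.length : Int)) (c :: rest) memo1 f1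
              hg1 hLval hLm (by omega)
          obtain ⟨f3, rfl⟩ : ∃ f3, f2 = f3 + 1 := ⟨f2 - 1, by omega⟩
          obtain ⟨memo3, heq3, hg3, hle3, hsome3⟩ := pvFinishCell nums queries c rest memo2 f3
            hg2 hv (fun _ => ⟨fun _ => hsome2, fun _ =>
              pvMemoLe_ne hle2 (c + 1) (by omega) hsome1⟩)
          refine ⟨memo3, f3, ?_, hg3, pvMemoLe_trans hle1 (pvMemoLe_trans hle2 hle3),
            hsome3, by omega⟩
          rw [heq0, heq1, heq2, heq3]
        · -- only the left parent pushed: stack becomes (c-N) :: c :: rest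
          have heq0 : pvRunB nums queries (f + 1) (c :: rest) memo =
              pvRunB nums queries f ((c - (nums.length : Int)) :: c :: rest) memo := by
            simp only [pvRunB, hmc, hIdef, hJdef, if_pos hp1, if_neg hp2]
            simp
          obtain ⟨memo1, f1, heq1, hg1, hle1, hsome1, hf1⟩ :=
            IH m' (by omega) (c - (nums.length : Int)) (c :: rest) memo f
              hg hLval hLm (by omega)
          obtain ⟨f2, rfl⟩ : ∃ f2, f1 = f2 + 1 := ⟨f1 - 1, by omega⟩
          obtain ⟨memo2, heq2, hg2, hle2, hsome2⟩ := pvFinishCell nums queries c rest memo1 f2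
            hg1 hv (fun _ => ⟨fun _ => hsome1, fun hj => by
              have hne : PySem.List.pyGetD memo (c + 1) none ≠ none := fun hnn => hp2 ⟨hj, hnn⟩
              exact pvMemoLe_ne hle1 (c + 1) (by omega) hne⟩)
          refine ⟨memo2, f2, ?_, hg2, pvMemoLe_trans hle1 hle2, hsome2, by omega⟩
          rw [heq0, heq1, heq2]
      · by_cases hp2 : pvJ (nums.length : Int) c + 1 < (nums.length : Int) ∧
            PySem.List.pyGetD memo (c + 1) none = none
        · -- only the right parent pushed: stack becomes (c+1) :: c :: rest
          obtain ⟨hRval, hRi, hRj, hRlvl⟩ := pvNbrR (nums.length : Int) c hN hv hp2.1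
          have hRm : pvLvl (nums.length : Int) (c + 1) = m' := by omega
          have heq0 : pvRunB nums queries (f + 1) (c :: rest) memo =
              pvRunB nums queries f ((c + 1) :: c :: rest) memo := by
            simp only [pvRunB, hmc, hIdef, hJdef, if_neg hp1, if_pos hp2]
            simp
          obtain ⟨memo1, f1, heq1, hg1, hle1, hsome1, hf1⟩ :=
            IH m' (by omega) (c + 1) (c :: rest) memo f hg hRval hRm (by omega)
          obtain ⟨f2, rfl⟩ : ∃ f2, f1 = f2 + 1 := ⟨f1 - 1, by omega⟩
          obtain ⟨memo2, heq2, hg2, hle2, hsome2⟩ := pvFinishCell nums queries c rest memo1 f2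
            hg1 hv (fun _ => ⟨fun hi => by
              have hne : PySem.List.pyGetD memo (c - (nums.length : Int)) none ≠ none :=
                fun hnn => hp1 ⟨hi, hnn⟩
              exact pvMemoLe_ne hle1 (c - (nums.length : Int))
                (by have := pvNbrL (nums.length : Int) c hN hv hi; exact this.1.1) hne,
              fun _ => hsome1⟩)
          refine ⟨memo2, f2, ?_, hg2, pvMemoLe_trans hle1 hle2, hsome2, by omega⟩
          rw [heq0, heq1, heq2]
        · -- both parents already memoized: resolve immediately
          obtain ⟨memo', heq, hg', hle, hsome⟩ := pvFinishCell nums queries c rest memo f hg hv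
            (fun _ => ⟨fun hi => fun hnn => hp1 ⟨hi, hnn⟩, fun hj => fun hnn => hp2 ⟨hj, hnn⟩⟩)
          exact ⟨memo', f, heq, hg', hle, hsome, by omega⟩

theorem pvRunB_nil (nums queries : List Int) (fuel : Nat) (memo : List (Option Int)) :
    pvRunB nums queries fuel [] memo = memo := by
  cases fuel <;> rfl

theorem pvRunB_call (nums queries : List Int) (memo : List (Option Int)) (i : Int)
    (hg : pvGood nums queries memo) (hi : 0 ≤ i) (hiN : i < (nums.length : Int)) :
    pvGood nums queries
        (pvRunB nums queries (3 ^ nums.length) [i * (nums.length : Int) + i] memo) ∧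
      PySem.List.pyGetD
          (pvRunB nums queries (3 ^ nums.length) [i * (nums.length : Int) + i] memo)
          (i * (nums.length : Int) + i) none
        = some (pvF nums queries (nums.length - 1) i.toNat) := by
  have hN : 0 < (nums.length : Int) := pvGood_N_pos nums queries memo hg
  obtain ⟨e1, e2⟩ := pvIJ_encode (nums.length : Int) i i hN hi hiN
  have hc0 : 0 ≤ i * (nums.length : Int) + i := by
    have := mul_nonneg hi (le_of_lt hN)
    omega
  have hvc : pvValidC (nums.length : Int) (i * (nums.length : Int) + i) :=
    ⟨hc0, by rw [e1]; exact hi, by rw [e1, e2], by rw [e2]; exact hiN⟩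
  have hlvl : pvLvl (nums.length : Int) (i * (nums.length : Int) + i) = nums.length - 1 := by
    unfold pvLvl
    rw [e1, e2]
    omega
  obtain ⟨memo', fuel', heq, hg', hle, hsome, _⟩ :=
    pvRunB_one nums queries (nums.length - 1) (i * (nums.length : Int) + i) [] memo
      (3 ^ nums.length) hg hvc hlvl
      (by rw [Nat.sub_add_cancel (by omega)])
  rw [heq, pvRunB_nil]
  cases hs : PySem.List.pyGetD memo' (i * (nums.length : Int) + i) none with
  | none => exact absurd hs hsome
  | some v =>
    obtain ⟨_, hveq⟩ := hg'.2.2 (i * (nums.length : Int) + i) v hc0 hs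
    rw [hveq, hlvl, e1]
    exact ⟨hg', rfl⟩

-- the common answer-folding function
def pvG (nums queries : List Int) (ans x : Int) : Int :=
  max ans (pvStep queries (queries.length : Int)
    (pvF nums queries (nums.length - 1) x.toNat) (PySem.List.pyGetD nums x 0))

theorem pvBfold (nums queries : List Int) :
    ∀ (l : List Int) (memo : List (Option Int)) (ans : Int),
      pvGood nums queries memo → (∀ x ∈ l, 0 ≤ x ∧ x < (nums.length : Int)) →
      (l.foldl (pvBloop nums queries) (memo, ans)).2 = l.foldl (pvG nums queries) ans := by
  intro l
  induction l with
  | nil => intro memo ans hg hmem; rfl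
  | cons x l ih =>
    intro memo ans hg hmem
    obtain ⟨hx0, hxN⟩ := hmem x (List.mem_cons_self)
    have hcall := pvRunB_call nums queries memo x hg hx0 hxN
    rw [List.foldl_cons, List.foldl_cons]
    have hstep : pvBloop nums queries (memo, ans) x =
        (pvRunB nums queries (3 ^ nums.length) [x * (nums.length : Int) + x] memo,
         pvG nums queries ans x) := by
      simp only [pvBloop, hcall.2, Option.getD_some, pvIfMax, pvG, pvStep]
    rw [hstep]
    exact ih _ _ hcall.1 (fun y hy => hmem y (List.mem_cons_of_mem _ hy))

theorem pvGoodInit (nums queries : List Int) (hne : nums ≠ []) :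
    pvGood nums queries
      (PySem.List.pySetD (List.replicate (nums.length * nums.length) (none : Option Int))
        ((nums.length : Int) - 1) (some 0)) := by
  have hN : 0 < (nums.length : Int) := by
    cases nums with
    | nil => exact absurd rfl hne
    | cons a l => exact_mod_cast Nat.succ_pos l.length
  have hlen : (List.replicate (nums.length * nums.length) (none : Option Int)).length
      = nums.length * nums.length := by simp
  have hlt : (nums.length : Int) - 1 <
      ((List.replicate (nums.length * nums.length) (none : Option Int)).length : Int) := by
    rw [hlen]
    have h1 : (nums.length : Int) ≤ (nums.length : Int) * (nums.length : Int) :=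
      le_mul_of_one_le_left (by omega) (by omega)
    push_cast
    omega
  refine ⟨?_, ?_, ?_⟩
  · rw [PySem.List.length_pySetD, hlen]
  · rw [pvMemoGetSet _ _ _ _ (by omega) hlt (by omega), if_pos rfl]
  · intro c v hc hv
    rw [pvMemoGetSet _ _ _ _ (by omega) hlt hc] at hv
    by_cases h : c = (nums.length : Int) - 1
    · rw [if_pos h] at hv
      obtain ⟨b1, b2, b3, b4⟩ := pvBaseCell (nums.length : Int) hN
      subst h
      have hv0 : v = 0 := by injection hv with h'; omega
      refine ⟨b3, ?_⟩
      rw [hv0, b4, b1]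
      rfl
    · rw [if_neg h, pvRepGet] at hv
      exact absurd hv (by simp)

-- ===== final assembly =====

-- ===== VERDICT (by name: the statement is the Claim_ definition above) =====
theorem maximumProcessableQueries_spec : Claim_equal_maximumProcessableQueries := by
  intro nums queries hdom hpre
  unfold Spec_maximumProcessableQueries
  have hN : 1 ≤ nums.length := by
    cases nums with
    | nil => exact absurd rfl hpre
    | cons a l => simp
  simp only [maximumProcessableQueries, maximumProcessableQueries_alt]
  -- the A-side table satisfies the invariant at the start
  have hrep : ∀ k : Nat, ((List.replicate nums.length
      (List.replicate nums.length (0 : Int))).getD k []).length =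
      if k < nums.length then nums.length else 0 := by
    intro k
    rw [List.getD_eq_getElem?_getD, List.getElem?_replicate]
    split
    · simp
    · simp
  have hrep0 : ∀ i j : Int, 0 ≤ i → 0 ≤ j →
      pvAget (List.replicate nums.length (List.replicate nums.length (0 : Int))) i j = 0 := by
    intro i j hi hj
    rw [pvAget_natGet _ i j hi hj,
      List.getD_eq_getElem?_getD (l := List.replicate nums.length (List.replicate nums.length (0 : Int))),
      List.getElem?_replicate]
    split
    · rw [Option.getD_some, List.getD_eq_getElem?_getD, List.getElem?_replicate]
      split
      · rfl
      · rfl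
    · rfl
  have hstart : pvInv nums queries
      (pvAsetL (List.replicate nums.length (List.replicate nums.length 0)) 0
        ((nums.length : Int) - 1) 0) (nums.length : Int) 0 := by
    refine ⟨by rw [pvAsetL_length]; simp, ?_, ?_⟩
    · intro k hk
      rw [pvAsetL_rows _ _ _ _ (by omega) (by omega), hrep k]
      rw [pvAsetL_length] at hk
      simp at hk
      rw [if_pos hk]
    · intro i j hi hj
      have hfalse : ¬ (0 ≤ i ∧ i ≤ j ∧ j < (nums.length : Int) ∧
          ((nums.length : Int) + 1 ≤ j - i + 1 ∨
            (j - i + 1 = (nums.length : Int) ∧ i < 0))) := by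
        omega
      rw [if_neg hfalse,
        pvAget_pvAsetL _ 0 ((nums.length : Int) - 1) i j _ (by omega) (by omega) hi hj
          (by simp; omega) (by rw [show ((0 : Int)).toNat = 0 from rfl, hrep 0, if_pos (by omega)]; omega)]
      split
      · rfl
      · exact hrep0 i j hi hj
  have hdp2 := pvA_outer_fold nums queries nums.length (nums.length : Int) _ rfl
    (le_refl _) hstart
  -- A's answer fold equals the common fold pvG
  have hA : (PySem.List.pyRange 0 (nums.length : Int) 1).foldl
      (pvAfin nums queries
        ((PySem.List.pyRange (nums.length : Int) 0 (-1)).foldl (pvAouter nums queries)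
          (pvAsetL (List.replicate nums.length (List.replicate nums.length 0)) 0
            ((nums.length : Int) - 1) 0))) 0 =
      (PySem.List.pyRange 0 (nums.length : Int) 1).foldl (pvG nums queries) 0 := by
    apply PySem.List.foldl_congr_mem
    intro acc x hx
    have hx' := PySem.List.mem_pyRange_one.mp hx
    have hdx := hdp2.2.2 x x (by omega) (by omega)
    rw [if_pos (by omega)] at hdx
    have hxx : (x - x + 1).toNat = 1 := by omega
    rw [hxx] at hdx
    simp only [pvAfin, pvG, pvStep]
    rw [hdx]
    split
    · rw [Int.add_comm]
    · rfl
  rw [hA]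
  -- B's fold equals the same
  rw [if_pos (show (0 : Int) < (nums.length : Int) by omega)]
  rw [pvBfold nums queries _ _ 0 (pvGoodInit nums queries hpre)
    (fun x hx => by have := PySem.List.mem_pyRange_one.mp hx; omega)]
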